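-- pv_equiv track=rewrite | github.com/AngelicaDiazB14/CLASESP. | Portafolio2A.py | superPrimo_aux
-- ===== SOURCE A (Python) =====
-- def superPrimo_aux(num, resultado):
--     if(num == 0):
--         return resultado
--     else:
--         if((num%2) != 0):
--             resultado += (num % 10)
--             return superPrimo_aux(num // 10, resultado)
--         else:
--             return superPrimo_aux(num // 10, resultado)
-- ===== SOURCE B (Python) =====
-- def superPrimo_aux(num, resultado):
--     # Two-phase: collect the decimal digits first, then sum the odd ones.
--     # (num // 10**i is odd exactly when its last digit is odd, since 10 is even.)
--     digits = []
--     while num != 0: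
--         digits.append(num % 10)
--         num //= 10
--     return resultado + sum(d for d in digits if d % 2 == 1)
-- ===== Notes on version B (the rewrite author's own statement) =====
-- stated objective: alternative
-- what changed: Replaces accumulator-threading tail recursion testing the parity of the whole remaining number with a two-phase loop that first extracts the digit list and then sums the digits that are themselves odd (equivalent because parity of num//10**i equals parity of its last digit).
import Mathlib
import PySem

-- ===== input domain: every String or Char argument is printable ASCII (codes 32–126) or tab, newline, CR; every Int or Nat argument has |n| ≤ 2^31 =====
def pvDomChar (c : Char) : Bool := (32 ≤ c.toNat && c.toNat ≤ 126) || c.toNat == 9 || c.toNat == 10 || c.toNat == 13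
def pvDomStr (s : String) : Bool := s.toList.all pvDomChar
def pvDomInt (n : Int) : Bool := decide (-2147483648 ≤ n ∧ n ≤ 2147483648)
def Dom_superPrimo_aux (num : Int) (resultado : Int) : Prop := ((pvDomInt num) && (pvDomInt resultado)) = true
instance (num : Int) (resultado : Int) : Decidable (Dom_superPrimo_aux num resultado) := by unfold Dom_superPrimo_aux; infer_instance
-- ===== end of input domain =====

-- B replaces accumulator-threading tail recursion with a two-phase digit-list extraction
-- followed by a sum of the odd digits (alternative decomposition, same cost).

-- ===== PORT A =====
-- termination guard: for num < 0 the Python recursion never terminates (outside Pre_);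
-- the guard only makes the port total there.
def superPrimo_aux (num : Int) (resultado : Int) : Int :=
  if num = 0 then resultado
  else if _h : num < 0 then resultado
  else if PySem.Int.mod num 2 ≠ 0 then
    superPrimo_aux (PySem.Int.floordiv num 10) (resultado + PySem.Int.mod num 10)
  else
    superPrimo_aux (PySem.Int.floordiv num 10) resultado
termination_by num.toNat
decreasing_by
  all_goals
    rw [PySem.Int.floordiv_eq_ediv_of_pos (by omega)]
    omega

-- ===== PORT B =====
-- the 'while num != 0: digits.append(num % 10); num //= 10' phase of Source B
-- (same divergence guard for num < 0, outside Pre_)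
def pvDigits (num : Int) : List Int :=
  if num = 0 then []
  else if _h : num < 0 then []
  else PySem.Int.mod num 10 :: pvDigits (PySem.Int.floordiv num 10)
termination_by num.toNat
decreasing_by
  rw [PySem.Int.floordiv_eq_ediv_of_pos (by omega)]
  omega

def superPrimo_aux_alt (num : Int) (resultado : Int) : Int :=
  resultado + (((pvDigits num).filter (fun d => PySem.Int.mod d 2 == 1)).foldl (· + ·) 0)

-- ===== PRECONDITION & SPEC =====
-- Pre_ excludes num < 0, where the Python A recurses forever (RecursionError) and B's loop never ends.
def Pre_superPrimo_aux (num : Int) (resultado : Int) : Prop := 0 ≤ num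
instance (num : Int) (resultado : Int) : Decidable (Pre_superPrimo_aux num resultado) := by unfold Pre_superPrimo_aux; infer_instance
def pvWitness_superPrimo_aux : Int × Int := (13579, 2)

def Spec_superPrimo_aux (num : Int) (resultado : Int) (out : Int) : Prop := out = superPrimo_aux_alt num resultado
instance (num : Int) (resultado : Int) (out : Int) : Decidable (Spec_superPrimo_aux num resultado out) := by unfold Spec_superPrimo_aux; infer_instance

-- ===== CLAIM (what is proved, stated in full; the proofs are below) =====
def Claim_equal_superPrimo_aux : Prop := ∀ (num : Int) (resultado : Int), Dom_superPrimo_aux num resultado → Pre_superPrimo_aux num resultado → Spec_superPrimo_aux num resultado (superPrimo_aux num resultado)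

-- ===== LEMMAS AND PROOFS =====

-- sum of the odd digits of num, as B computes it
def pvOddSum (num : Int) : Int :=
  ((pvDigits num).filter (fun d => PySem.Int.mod d 2 == 1)).foldl (· + ·) 0

lemma foldl_add_shift (l : List Int) (a b : Int) :
    l.foldl (· + ·) (a + b) = a + l.foldl (· + ·) b := by
  induction l generalizing b with
  | nil => rfl
  | cons x xs ih => simp only [List.foldl_cons]; rw [add_assoc, ih]

lemma pvOddSum_step (num : Int) (h0 : 0 < num) :
    pvOddSum num =
      (if PySem.Int.mod num 2 ≠ 0 then PySem.Int.mod num 10 else 0)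
        + pvOddSum (PySem.Int.floordiv num 10) := by
  unfold pvOddSum
  rw [pvDigits]
  have hne : ¬ num = 0 := by omega
  have hnl : ¬ num < 0 := by omega
  simp only [hne, hnl, if_false, dite_false, List.filter_cons]
  have hpar : (PySem.Int.mod (PySem.Int.mod num 10) 2 == 1) = (PySem.Int.mod num 2 ≠ 0 : Bool) := by
    rw [PySem.Int.mod_eq_emod_of_pos (a := num) (by norm_num : (0:Int) < 10),
        PySem.Int.mod_eq_emod_of_pos (by norm_num : (0:Int) < 2),
        PySem.Int.mod_eq_emod_of_pos (by norm_num : (0:Int) < 2)]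
    have := Int.emod_emod_of_dvd num (by norm_num : (2:Int) ∣ 10)
    rw [this]
    have h2 := Int.emod_two_eq num
    rcases h2 with h | h <;> simp [h]
  rw [hpar]
  by_cases hodd : PySem.Int.mod num 2 ≠ 0
  · rw [if_pos (by simpa using hodd), if_pos hodd, List.foldl_cons,
        show (0 : Int) + PySem.Int.mod num 10 = PySem.Int.mod num 10 + 0 by ring,
        foldl_add_shift]
  · rw [if_neg (by simpa using hodd), if_neg hodd, zero_add]

lemma superPrimo_aux_eq_oddSum (n : Nat) : ∀ (num resultado : Int), num.toNat = n → 0 ≤ num →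
    superPrimo_aux num resultado = resultado + pvOddSum num := by
  induction n using Nat.strong_induction_on with
  | _ n ih =>
    intro num resultado hn hnn
    rw [superPrimo_aux]
    by_cases h0 : num = 0
    · subst h0
      simp [pvOddSum, pvDigits]
    · have hpos : 0 < num := by omega
      have hnl : ¬ num < 0 := by omega
      have hdlt : (PySem.Int.floordiv num 10).toNat < n := by
        rw [PySem.Int.floordiv_eq_ediv_of_pos (by norm_num : (0:Int) < 10)]
        omega
      have hdnn : 0 ≤ PySem.Int.floordiv num 10 := by
        rw [PySem.Int.floordiv_eq_ediv_of_pos (by norm_num : (0:Int) < 10)]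
        omega
      simp only [h0, if_false, dif_neg hnl]
      rw [pvOddSum_step num hpos]
      by_cases hodd : PySem.Int.mod num 2 ≠ 0
      · rw [if_pos hodd, if_pos hodd, ih _ hdlt _ _ rfl hdnn]
        ring
      · rw [if_neg hodd, if_neg hodd, ih _ hdlt _ _ rfl hdnn]
        ring

-- ===== VERDICT (by name: the statement is the Claim_ definition above) =====
theorem superPrimo_aux_spec : Claim_equal_superPrimo_aux := by
  intro num resultado _ hpre
  unfold Spec_superPrimo_aux superPrimo_aux_alt
  exact superPrimo_aux_eq_oddSum num.toNat num resultado rfl hpre
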